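-- pv_equiv track=rewrite | github.com/bkh4178/Data-structure | Week1_Stack&Queue/Stack.py | is_matched_html
-- ===== SOURCE A (Python) =====
-- class ArrayStack:
--     '''pyhthon list를 기본 저장소로 사용하는 LIFO 스택 구현'''
--     def __init__(self) :
--         '''빈 스택 생성'''
--         self.data = []
--
--     def __len__(self) :
--         return len(self.data)
--
--     def is_empty(self):
--         return len(self.data) == 0
--
--     def push(self, e) :
--         self.data.append(e)
--
--     def top(self) :
--         if self.is_empty() != 0 :
--             raise Empty('Stack is empty')
--         return self.data[-1]
--
--     def pop(self) :
--         if self.is_empty() :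
--             raise Empty('Stack is empty')
--         return self.data.pop()
--
-- def is_matched_html(raw):
--     S = ArrayStack()
--     j = raw.find('<')
--     while j != -1:
--         k = raw.find('>', j+1)
--         if k == -1: return False
--         tag = raw[j+1:k]
--         if not tag.startswith('/'):
--             S.push(tag)
--         else:
--             if S.is_empty(): return False
--             if tag[1:] != S.pop() : return False
--         j = raw.find('<',k+1)
--     return S.is_empty()
-- ===== SOURCE B (Python) =====
-- def is_matched_html(raw):
--     # Tokenize first: split on '>' -- each piece before a '>' holds at most one
--     # tag (everything after its first '<'); text after the final '>' must not
--     # contain an unclosed '<'.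
--     *chunks, last = raw.split('>')
--     if '<' in last:
--         return False
--     stack = []
--     for chunk in chunks:
--         i = chunk.find('<')
--         if i == -1:
--             continue
--         tag = chunk[i + 1:]
--         if tag.startswith('/'):
--             if not stack or stack.pop() != tag[1:]:
--                 return False
--         else:
--             stack.append(tag)
--     return not stack
-- ===== Notes on version B (the rewrite author's own statement) =====
-- stated objective: alternative
-- what changed: A's interleaved while-loop of str.find cursor jumps is replaced by a tokenize-then-validate decomposition: split the string on '>', reject a dangling '<' after the last '>', then run one stack pass over the chunk list.
import Mathlib
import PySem

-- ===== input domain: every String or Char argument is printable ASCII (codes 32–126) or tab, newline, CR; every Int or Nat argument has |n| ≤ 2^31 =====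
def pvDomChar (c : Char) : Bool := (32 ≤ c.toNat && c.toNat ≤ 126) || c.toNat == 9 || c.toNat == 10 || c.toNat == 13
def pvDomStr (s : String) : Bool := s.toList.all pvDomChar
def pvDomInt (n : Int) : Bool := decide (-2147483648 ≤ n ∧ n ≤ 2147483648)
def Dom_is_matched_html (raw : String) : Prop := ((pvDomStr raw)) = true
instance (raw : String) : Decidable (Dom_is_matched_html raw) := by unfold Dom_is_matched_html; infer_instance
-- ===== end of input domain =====

-- B replaces A's interleaved find/scan while-loop by a tokenize-then-validate pass
-- (split on '>', then one stack loop over the chunks); objective: alternative decomposition.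

-- ===== PORT A =====
-- A's while-loop: j/k cursor positions via str.find, a LIFO stack (top = head).
-- fuel = |raw| + 1 only makes the while-loop total; it is never exhausted (j strictly grows).
def aLoop (cs : List Char) (S : List (List Char)) (j : Int) : Nat → Bool
  | 0 => false
  | fuel + 1 =>
    if j ≠ -1 then
      let k := PySem.Chars.findFrom cs ['>'] (j + 1)
      if k = -1 then false
      else
        let tag := PySem.Chars.slice cs (some (j + 1)) (some k)
        if !(PySem.Chars.startswith tag ['/']) then
          aLoop cs (tag :: S) (PySem.Chars.findFrom cs ['<'] (k + 1)) fuel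
        else
          match S with
          | [] => false
          | top :: S' =>
            if PySem.Chars.slice tag (some 1) none ≠ top then false
            else aLoop cs S' (PySem.Chars.findFrom cs ['<'] (k + 1)) fuel
    else S.isEmpty

def is_matched_html (raw : String) : Bool :=
  aLoop raw.toList [] (PySem.Chars.find raw.toList ['<']) (raw.toList.length + 1)

-- ===== PORT B =====
-- B: split on '>', reject a dangling '<' after the last '>', then one stack pass over the chunks.
def bLoop (S : List (List Char)) : List (List Char) → Bool
  | [] => S.isEmpty
  | chunk :: rest =>
    let i := PySem.Chars.find chunk ['<']
    if i = -1 then bLoop S rest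
    else
      let tag := PySem.Chars.slice chunk (some (i + 1)) none
      if PySem.Chars.startswith tag ['/'] then
        match S with
        | [] => false
        | top :: S' =>
          if top ≠ PySem.Chars.slice tag (some 1) none then false
          else bLoop S' rest
      else bLoop (tag :: S) rest

def is_matched_html_alt (raw : String) : Bool :=
  let parts := PySem.Chars.splitOn raw.toList ['>']
  if PySem.Chars.isIn ['<'] (parts.getLastD []) then false
  else bLoop [] parts.dropLast

-- ===== PRECONDITION & SPEC =====
def Spec_is_matched_html (raw : String) (out : Bool) : Prop := out = is_matched_html_alt raw
instance (raw : String) (out : Bool) : Decidable (Spec_is_matched_html raw out) := by unfold Spec_is_matched_html; infer_instance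

-- ===== CLAIM (what is proved, stated in full; the proofs are below) =====
def Claim_equal_is_matched_html : Prop := ∀ (raw : String), Dom_is_matched_html raw → Spec_is_matched_html raw (is_matched_html raw)

-- ===== LEMMAS AND PROOFS =====

-- split a char list at its first '>' (proof-side tokenizer shared by both directions)
def splitGt : List Char → Option (List Char × List Char)
  | [] => none
  | c :: t => if c = '>' then some ([], t) else (splitGt t).map (fun p => (c :: p.1, p.2))

theorem splitGt_length {l : List Char} {p : List Char × List Char} (h : splitGt l = some p) :
    p.2.length < l.length := by
  induction l generalizing p with
  | nil => simp [splitGt] at h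
  | cons c t ih =>
    by_cases hc : c = '>'
    · simp [splitGt, hc] at h; subst h; simp
    · rw [show splitGt (c :: t) = (splitGt t).map (fun p => (c :: p.1, p.2)) by simp [splitGt, hc]] at h
      rcases hq : splitGt t with _ | q
      · rw [hq] at h; simp at h
      · rw [hq] at h; simp at h
        have := ih hq
        rw [← h]
        simp; omega

def splitAll (l : List Char) : List (List Char) :=
  match h : splitGt l with
  | none => [l]
  | some (a, b) => a :: splitAll b
termination_by l.length
decreasing_by exact splitGt_length h

-- the reference validator both ports are reduced to
def go (S : List (List Char)) : List Char → Bool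
  | [] => S.isEmpty
  | c :: rest =>
    if c = '<' then
      match h : splitGt rest with
      | none => false
      | some (tag, rest') =>
        if !(PySem.Chars.startswith tag ['/']) then
          go (tag :: S) rest'
        else
          match S with
          | [] => false
          | top :: S' =>
            if PySem.Chars.slice tag (some 1) none ≠ top then false
            else go S' rest'
    else go S rest
termination_by l => l.length
decreasing_by
  · exact Nat.lt_succ_of_lt (splitGt_length h)
  · exact Nat.lt_succ_of_lt (splitGt_length h)
  · simp
-- equation lemmas for the wf-recursive go and for the fuel-based splitOn.go
theorem go_cons_ne (S : List (List Char)) (c : Char) (rest : List Char) (hc : ¬ c = '<') :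
    go S (c :: rest) = go S rest := by
  rw [go, if_neg hc]

theorem go_lt_none (S : List (List Char)) (rest : List Char) (h : splitGt rest = none) :
    go S ('<' :: rest) = false := by
  rw [go]; rw [if_pos rfl]; split <;> simp_all

theorem go_lt_some (S : List (List Char)) (rest tag rest' : List Char)
    (h : splitGt rest = some (tag, rest')) :
    go S ('<' :: rest) =
      (if !(PySem.Chars.startswith tag ['/']) then go (tag :: S) rest'
       else match S with
         | [] => false
         | top :: S' => if PySem.Chars.slice tag (some 1) none ≠ top then false else go S' rest') := by
  rw [go]; rw [if_pos rfl]; split <;> simp_all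

theorem go_no_lt {l : List Char} (h : '<' ∉ l) (S : List (List Char)) :
    go S l = S.isEmpty := by
  induction l with
  | nil => rw [go]
  | cons c rest ih =>
    have hc : ¬ c = '<' := by intro hh; exact h (hh ▸ List.mem_cons_self)
    rw [go_cons_ne S c rest hc]
    exact ih (fun hm => h (List.mem_cons_of_mem _ hm))

theorem go_append_no_lt {a : List Char} (h : '<' ∉ a) (S : List (List Char)) (l : List Char) :
    go S (a ++ l) = go S l := by
  induction a with
  | nil => simp
  | cons c t ih =>
    have hc : ¬ c = '<' := by intro hh; exact h (hh ▸ List.mem_cons_self)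
    rw [List.cons_append, go_cons_ne S c _ hc]
    exact ih (fun hm => h (List.mem_cons_of_mem _ hm))

theorem splitGt_none_iff {l : List Char} : splitGt l = none ↔ '>' ∉ l := by
  induction l with
  | nil => simp [splitGt]
  | cons c t ih =>
    by_cases hc : c = '>'
    · subst hc; simp [splitGt]
    · simp [splitGt, hc, ih, Ne.symm hc]

theorem go_no_gt_lt {l : List Char} (hg : '>' ∉ l) (hl : '<' ∈ l) (S : List (List Char)) :
    go S l = false := by
  induction l with
  | nil => cases hl
  | cons c t ih =>
    by_cases hc : c = '<'
    · subst hc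
      have ht : splitGt t = none :=
        splitGt_none_iff.mpr (fun hm => hg (List.mem_cons_of_mem _ hm))
      exact go_lt_none S t ht
    · rw [go_cons_ne S c t hc]
      have hlt : '<' ∈ t := by
        rcases List.mem_cons.mp hl with h1 | h1
        · exact absurd h1.symm hc
        · exact h1
      exact ih (fun hm => hg (List.mem_cons_of_mem _ hm)) hlt

theorem splitGt_append {a : List Char} (h : '>' ∉ a) (b : List Char) :
    splitGt (a ++ '>' :: b) = some (a, b) := by
  induction a with
  | nil => simp [splitGt]
  | cons c t ih =>
    have hc : ¬ c = '>' := by intro hh; exact h (hh ▸ List.mem_cons_self)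
    rw [List.cons_append]
    simp [splitGt, hc, ih (fun hm => h (List.mem_cons_of_mem _ hm))]

theorem splitGt_some {l a b : List Char} (h : splitGt l = some (a, b)) :
    l = a ++ '>' :: b ∧ '>' ∉ a := by
  induction l generalizing a b with
  | nil => simp [splitGt] at h
  | cons c t ih =>
    by_cases hc : c = '>'
    · subst hc
      simp [splitGt] at h
      obtain ⟨rfl, rfl⟩ := h
      simp
    · rw [show splitGt (c :: t) = (splitGt t).map (fun p => (c :: p.1, p.2)) by
        simp [splitGt, hc]] at h
      rcases hq : splitGt t with _ | ⟨a', b'⟩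
      · rw [hq] at h; simp at h
      · rw [hq] at h; simp at h
        obtain ⟨hb, ha⟩ := h
        subst hb; subst ha
        obtain ⟨h1, h2⟩ := ih hq
        constructor
        · rw [h1]; simp
        · intro hm
          rcases List.mem_cons.mp hm with h3 | h3
          · exact hc h3.symm
          · exact h2 h3

def consHead (p : List Char) : List (List Char) → List (List Char)
  | [] => [p]
  | x :: xs => (p ++ x) :: xs

theorem splitAll_of_none {l : List Char} (h : splitGt l = none) : splitAll l = [l] := by
  rw [splitAll]; split <;> simp_all

theorem splitAll_of_some {l a b : List Char} (h : splitGt l = some (a, b)) :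
    splitAll l = a :: splitAll b := by
  rw [splitAll]; split <;> simp_all

theorem splitAll_ne_nil (l : List Char) : splitAll l ≠ [] := by
  rcases h : splitGt l with _ | ⟨a, b⟩
  · rw [splitAll_of_none h]; simp
  · rw [splitAll_of_some h]; simp

theorem splitOn_go_spec : ∀ (fuel : Nat) (l cur : List Char) (acc : List (List Char)),
    l.length < fuel →
    PySem.Chars.splitOn.go ['>'] fuel l cur acc = acc.reverse ++ consHead cur.reverse (splitAll l) := by
  intro fuel
  induction fuel with
  | zero => intro l cur acc hf; omega
  | succ fuel ih =>
    intro l cur acc hf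
    match l with
    | [] =>
      rw [show PySem.Chars.splitOn.go ['>'] (fuel+1) [] cur acc = (cur.reverse :: acc).reverse by
        rw [PySem.Chars.splitOn.go]; simp]
      rw [splitAll_of_none (by rw [splitGt_none_iff]; simp)]
      simp [consHead]
    | c :: rest =>
      by_cases hc : c = '>'
      · subst hc
        rw [show PySem.Chars.splitOn.go ['>'] (fuel+1) ('>'::rest) cur acc
              = PySem.Chars.splitOn.go ['>'] fuel rest [] (cur.reverse :: acc) by
          rw [PySem.Chars.splitOn.go]; simp [List.isPrefixOf]]
        rw [ih rest [] (cur.reverse :: acc) (by simp at hf ⊢; omega)]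
        rw [splitAll_of_some (show splitGt ('>'::rest) = some ([], rest) by simp [splitGt])]
        obtain ⟨x, xs, hx⟩ : ∃ x xs, splitAll rest = x :: xs := by
          rcases hsa : splitAll rest with _ | ⟨x, xs⟩
          · exact absurd hsa (splitAll_ne_nil rest)
          · exact ⟨x, xs, rfl⟩
        rw [hx]
        simp [consHead]
      · rw [show PySem.Chars.splitOn.go ['>'] (fuel+1) (c::rest) cur acc
              = PySem.Chars.splitOn.go ['>'] fuel rest (c :: cur) acc by
          rw [PySem.Chars.splitOn.go]; simp [List.isPrefixOf, Ne.symm hc]]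
        rw [ih rest (c :: cur) acc (by simp at hf ⊢; omega)]
        rcases hq : splitGt rest with _ | ⟨a, b⟩
        · rw [splitAll_of_none hq,
            splitAll_of_none (show splitGt (c::rest) = none by
              rw [splitGt_none_iff] at hq ⊢; simp [Ne.symm hc, hq])]
          simp [consHead]
        · rw [splitAll_of_some hq,
            splitAll_of_some (show splitGt (c::rest) = some (c::a, b) by
              simp [splitGt, hc, hq])]
          simp [consHead]

theorem splitOn_eq_splitAll (l : List Char) : PySem.Chars.splitOn l ['>'] = splitAll l := by
  rw [PySem.Chars.splitOn, splitOn_go_spec (l.length + 1) l [] [] (by omega)]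
  obtain ⟨x, xs, hx⟩ : ∃ x xs, splitAll l = x :: xs := by
    rcases hsa : splitAll l with _ | ⟨x, xs⟩
    · exact absurd hsa (splitAll_ne_nil l)
    · exact ⟨x, xs, rfl⟩
  rw [hx]; simp [consHead]

theorem prefix_singleton_iff {c : Char} {l : List Char} {i : Nat} (h : i < l.length) :
    [c] <+: l.drop i ↔ l[i] = c := by
  rw [List.drop_eq_getElem_cons h, List.cons_prefix_cons]
  simp [eq_comm]

theorem not_mem_take {c : Char} {l : List Char} {n : Nat}
    (h : ∀ i < n, ¬ [c] <+: l.drop i) : c ∉ l.take n := by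
  intro hmem
  obtain ⟨i, hi, hgi⟩ := List.getElem_of_mem hmem
  have hil : i < n := by simp at hi; omega
  have hll : i < l.length := by simp at hi; omega
  rw [List.getElem_take] at hgi
  exact h i hil ((prefix_singleton_iff hll).mpr hgi)

theorem aLoop_eq (cs : List Char) : ∀ (fuel m : Nat) (S : List (List Char)),
    m ≤ cs.length → cs.length - m < fuel →
    aLoop cs S (PySem.Chars.findFrom cs ['<'] (m : Int)) fuel = go S (cs.drop m) := by
  intro fuel
  induction fuel with
  | zero => intro m S hm hf; omega
  | succ fuel ih =>
    intro m S hm hf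
    rw [PySem.Chars.findFrom_natCast cs ['<'] m hm]
    by_cases hfind : PySem.Chars.find (cs.drop m) ['<'] = -1
    · rw [if_pos hfind]
      have hnl : '<' ∉ cs.drop m := fun hmem =>
        (PySem.Chars.find_eq_neg_one_iff (cs.drop m) ['<']).mp hfind
          ((List.singleton_infix_iff _ _).mpr hmem)
      rw [go_no_lt hnl S, aLoop]
      simp
    · rw [if_neg hfind]
      have hge := PySem.Chars.neg_one_le_find (cs.drop m) ['<']
      have hle := PySem.Chars.find_le_length (cs.drop m) ['<']
      obtain ⟨fn, hfn⟩ : ∃ fn : Nat, PySem.Chars.find (cs.drop m) ['<'] = (fn : Int) :=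
        ⟨(PySem.Chars.find (cs.drop m) ['<']).toNat, by omega⟩
      obtain ⟨hpre, hmin⟩ := PySem.Chars.find_spec (s := cs.drop m) (sub := ['<']) (by omega)
      rw [hfn] at hpre hmin ⊢
      simp only [Int.toNat_natCast] at hpre hmin
      rw [List.drop_drop] at hpre
      have hjlen : m + fn < cs.length := by
        have h0 : cs.drop (m + fn) ≠ [] := by
          intro h0; rw [h0, List.prefix_nil] at hpre; exact List.cons_ne_nil _ _ hpre
        rw [ne_eq, List.drop_eq_nil_iff] at h0; omega
      have hhead : cs[m + fn]'hjlen = '<' := (prefix_singleton_iff hjlen).mp hpre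
      have hnotake : '<' ∉ (cs.drop m).take fn := not_mem_take hmin
      conv_rhs => rw [← List.take_append_drop fn (cs.drop m), List.drop_drop]
      rw [go_append_no_lt hnotake, List.drop_eq_getElem_cons hjlen, hhead]
      -- the A side
      simp only [aLoop]
      rw [if_pos (show (m : Int) + (fn : Int) ≠ -1 by omega)]
      have hc1 : (m : Int) + (fn : Int) + 1 = ((m + fn + 1 : Nat) : Int) := by push_cast; ring
      rw [hc1, PySem.Chars.findFrom_natCast cs ['>'] (m + fn + 1) (by omega)]
      by_cases hg : PySem.Chars.find (cs.drop (m + fn + 1)) ['>'] = -1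
      · rw [if_pos hg]
        have hng : '>' ∉ cs.drop (m + fn + 1) := fun hmem =>
          (PySem.Chars.find_eq_neg_one_iff _ ['>']).mp hg
            ((List.singleton_infix_iff _ _).mpr hmem)
        rw [go_lt_none S _ (splitGt_none_iff.mpr hng)]
        simp
      · have hge2 := PySem.Chars.neg_one_le_find (cs.drop (m + fn + 1)) ['>']
        obtain ⟨gn, hgn⟩ : ∃ gn : Nat, PySem.Chars.find (cs.drop (m + fn + 1)) ['>'] = (gn : Int) :=
          ⟨(PySem.Chars.find (cs.drop (m + fn + 1)) ['>']).toNat, by omega⟩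
        obtain ⟨hpre2, hmin2⟩ :=
          PySem.Chars.find_spec (s := cs.drop (m + fn + 1)) (sub := ['>']) (by omega)
        rw [hgn] at hpre2 hmin2
        simp only [Int.toNat_natCast] at hpre2 hmin2
        rw [List.drop_drop] at hpre2
        have hklen : m + fn + 1 + gn < cs.length := by
          have h0 : cs.drop (m + fn + 1 + gn) ≠ [] := by
            intro h0; rw [h0, List.prefix_nil] at hpre2; exact List.cons_ne_nil _ _ hpre2
          rw [ne_eq, List.drop_eq_nil_iff] at h0; omega
        have hkhead : cs[m + fn + 1 + gn]'hklen = '>' := (prefix_singleton_iff hklen).mp hpre2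
        have hngtake : '>' ∉ (cs.drop (m + fn + 1)).take gn := not_mem_take hmin2
        have hdec : cs.drop (m + fn + 1)
            = (cs.drop (m + fn + 1)).take gn ++ '>' :: cs.drop (m + fn + 1 + gn + 1) := by
          conv_lhs => rw [← List.take_append_drop gn (cs.drop (m + fn + 1)), List.drop_drop]
          rw [List.drop_eq_getElem_cons hklen, hkhead]
        have hsplit : splitGt (cs.drop (m + fn + 1))
            = some ((cs.drop (m + fn + 1)).take gn, cs.drop (m + fn + 1 + gn + 1)) := by
          conv_lhs => rw [hdec]
          exact splitGt_append hngtake _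
        rw [if_neg hg, hgn]
        have hc3 : ((m + fn + 1 : Nat) : Int) + (gn : Int) = ((m + fn + 1 + gn : Nat) : Int) := by
          push_cast; ring
        rw [hc3, if_neg (show ¬ ((m + fn + 1 + gn : Nat) : Int) = -1 by omega)]
        rw [go_lt_some S _ _ _ hsplit]
        have htag : PySem.Chars.slice cs (some ((m + fn + 1 : Nat) : Int))
              (some ((m + fn + 1 + gn : Nat) : Int))
            = (cs.drop (m + fn + 1)).take gn := by
          rw [PySem.Chars.slice_eq_listSlice, PySem.List.slice_natCast]
          congr 1
          omega
        rw [htag]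
        have hc4 : ((m + fn + 1 + gn : Nat) : Int) + 1 = ((m + fn + 1 + gn + 1 : Nat) : Int) := by
          push_cast; ring
        rw [hc4]
        by_cases hsw : PySem.Chars.startswith ((cs.drop (m + fn + 1)).take gn) ['/'] = true
        · simp only [hsw, Bool.not_true, Bool.false_eq_true, if_false]
          cases S with
          | nil => rfl
          | cons top S' =>
            by_cases heq : PySem.Chars.slice ((cs.drop (m + fn + 1)).take gn) (some 1) none = top
            · simp only [heq, ne_eq, not_true_eq_false, if_false]
              exact ih (m + fn + 1 + gn + 1) S' (by omega) (by omega)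
            · simp only [ne_eq, heq, not_false_eq_true, if_true]
        · simp only [Bool.not_eq_true] at hsw
          simp only [hsw, Bool.not_false, if_true]
          exact ih (m + fn + 1 + gn + 1) _ (by omega) (by omega)

theorem getLastD_of_ne_nil {α : Type} {l : List α} (h : l ≠ []) (d d' : α) :
    l.getLastD d = l.getLastD d' := by
  cases l with
  | nil => cases h rfl
  | cons x xs =>
    rcases h2 : (x :: xs).getLast? with _ | y
    · rw [List.getLast?_eq_none_iff] at h2; cases h2
    · simp [List.getLastD_eq_getLast?, h2]

-- one chunk (no '>' inside) followed by '>': go processes at most one tag from it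
theorem go_append_gt (a b : List Char) (hng : '>' ∉ a) (S : List (List Char)) :
    go S (a ++ '>' :: b) =
      (if PySem.Chars.find a ['<'] = -1 then go S b
       else
         if !(PySem.Chars.startswith (PySem.Chars.slice a (some (PySem.Chars.find a ['<'] + 1)) none) ['/']) then
           go (PySem.Chars.slice a (some (PySem.Chars.find a ['<'] + 1)) none :: S) b
         else match S with
           | [] => false
           | top :: S' =>
             if PySem.Chars.slice (PySem.Chars.slice a (some (PySem.Chars.find a ['<'] + 1)) none) (some 1) none ≠ top then
               false
             else go S' b) := by
  by_cases hi : PySem.Chars.find a ['<'] = -1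
  · rw [if_pos hi]
    have hnl : '<' ∉ a := fun hmem =>
      (PySem.Chars.find_eq_neg_one_iff a ['<']).mp hi ((List.singleton_infix_iff _ _).mpr hmem)
    rw [go_append_no_lt hnl, go_cons_ne S _ _ (by decide)]
  · rw [if_neg hi]
    have hge := PySem.Chars.neg_one_le_find a ['<']
    obtain ⟨idx, hidx⟩ : ∃ idx : Nat, PySem.Chars.find a ['<'] = (idx : Int) :=
      ⟨(PySem.Chars.find a ['<']).toNat, by omega⟩
    obtain ⟨hpre, hmin⟩ := PySem.Chars.find_spec (s := a) (sub := ['<']) (by omega)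
    rw [hidx] at hpre hmin
    simp only [Int.toNat_natCast] at hpre hmin
    have hlen : idx < a.length := by
      have h0 : a.drop idx ≠ [] := by
        intro h0; rw [h0, List.prefix_nil] at hpre; exact List.cons_ne_nil _ _ hpre
      rw [ne_eq, List.drop_eq_nil_iff] at h0; omega
    have hhead : a[idx]'hlen = '<' := (prefix_singleton_iff hlen).mp hpre
    have hnotake : '<' ∉ a.take idx := not_mem_take hmin
    have hng' : '>' ∉ a.drop (idx + 1) := fun hmem => hng (List.drop_subset _ _ hmem)
    have htag : PySem.Chars.slice a (some (PySem.Chars.find a ['<'] + 1)) none = a.drop (idx + 1) := by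
      rw [hidx, PySem.Chars.slice_eq_listSlice, PySem.List.slice_from _ (by omega)]
      congr 1
    have ha : a ++ '>' :: b = a.take idx ++ ('<' :: (a.drop (idx + 1) ++ '>' :: b)) := by
      conv_lhs => rw [← List.take_append_drop idx a, List.drop_eq_getElem_cons hlen, hhead]
      simp
    rw [ha, go_append_no_lt hnotake, go_lt_some S _ _ _ (splitGt_append hng' b), htag]

theorem bLoop_nil (S : List (List Char)) : bLoop S [] = S.isEmpty := by
  rw [bLoop]

theorem bLoop_cons (S : List (List Char)) (chunk : List Char) (rest : List (List Char)) :
    bLoop S (chunk :: rest) =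
      (if PySem.Chars.find chunk ['<'] = -1 then bLoop S rest
       else
         if PySem.Chars.startswith (PySem.Chars.slice chunk (some (PySem.Chars.find chunk ['<'] + 1)) none) ['/'] then
           match S with
           | [] => false
           | top :: S' =>
             if top ≠ PySem.Chars.slice (PySem.Chars.slice chunk (some (PySem.Chars.find chunk ['<'] + 1)) none) (some 1) none then
               false
             else bLoop S' rest
         else bLoop (PySem.Chars.slice chunk (some (PySem.Chars.find chunk ['<'] + 1)) none :: S) rest) := by
  rw [bLoop]

-- joint induction: a dangling '<' after the last '>' forces False, otherwise go is B's chunk loop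
theorem bAux : ∀ (n : Nat) (l : List Char) (S : List (List Char)), l.length ≤ n →
    (('<' ∈ (splitAll l).getLastD []) → go S l = false) ∧
    ('<' ∉ (splitAll l).getLastD [] → go S l = bLoop S (splitAll l).dropLast) := by
  intro n
  induction n with
  | zero =>
    intro l S hn
    have hl : l = [] := by cases l with | nil => rfl | cons c t => simp at hn
    subst hl
    rw [splitAll_of_none (splitGt_none_iff.mpr (by simp))]
    constructor
    · intro hin; simp at hin
    · intro _
      rw [go, show ([[]] : List (List Char)).dropLast = ([] : List (List Char)) by rfl, bLoop_nil]
  | succ n ihn =>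
    intro l S hn
    rcases hq : splitGt l with _ | ⟨a, b⟩
    · have hng : '>' ∉ l := splitGt_none_iff.mp hq
      rw [splitAll_of_none hq]
      constructor
      · intro hin
        simp only [List.getLastD] at hin
        exact go_no_gt_lt hng (by simpa using hin) S
      · intro hnin
        simp only [List.getLastD] at hnin
        rw [go_no_lt (by simpa using hnin) S]
        rw [show ([l] : List (List Char)).dropLast = [] by simp, bLoop_nil]
    · obtain ⟨hl, hng⟩ := splitGt_some hq
      have hblen : b.length ≤ n := by
        have := splitGt_length hq
        simp at this
        omega
      rw [splitAll_of_some hq]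
      obtain ⟨x, xs, hx⟩ : ∃ x xs, splitAll b = x :: xs := by
        rcases hsa : splitAll b with _ | ⟨x, xs⟩
        · exact absurd hsa (splitAll_ne_nil b)
        · exact ⟨x, xs, rfl⟩
      have hlast : ∀ d : List Char, (a :: splitAll b).getLastD d = (splitAll b).getLastD [] := by
        intro d
        rw [hx, List.getLastD_cons]
        exact getLastD_of_ne_nil (by simp) a []
      have hdrop : (a :: splitAll b).dropLast = a :: (splitAll b).dropLast := by
        rw [hx]; simp
      rw [hlast, hdrop, hl, go_append_gt a b hng S]
      constructor
      · intro hin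
        by_cases hi : PySem.Chars.find a ['<'] = -1
        · rw [if_pos hi]
          exact (ihn b S hblen).1 hin
        · rw [if_neg hi]
          by_cases hsw : PySem.Chars.startswith (PySem.Chars.slice a (some (PySem.Chars.find a ['<'] + 1)) none) ['/'] = true
          · simp only [hsw, Bool.not_true, Bool.false_eq_true, if_false]
            cases S with
            | nil => rfl
            | cons top S' =>
              by_cases heq : PySem.Chars.slice (PySem.Chars.slice a (some (PySem.Chars.find a ['<'] + 1)) none) (some 1) none = top
              · simp only [heq, ne_eq, not_true_eq_false, if_false]
                exact (ihn b S' hblen).1 hin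
              · simp only [ne_eq, heq, not_false_eq_true, if_true]
          · simp only [Bool.not_eq_true] at hsw
            simp only [hsw, Bool.not_false, if_true]
            exact (ihn b _ hblen).1 hin
      · intro hnin
        rw [bLoop_cons]
        by_cases hi : PySem.Chars.find a ['<'] = -1
        · rw [if_pos hi, if_pos hi]
          exact (ihn b S hblen).2 hnin
        · rw [if_neg hi, if_neg hi]
          by_cases hsw : PySem.Chars.startswith (PySem.Chars.slice a (some (PySem.Chars.find a ['<'] + 1)) none) ['/'] = true
          · simp only [hsw, Bool.not_true, Bool.false_eq_true, if_false, if_true]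
            cases S with
            | nil => rfl
            | cons top S' =>
              by_cases heq : PySem.Chars.slice (PySem.Chars.slice a (some (PySem.Chars.find a ['<'] + 1)) none) (some 1) none = top
              · simp only [heq, ne_eq, not_true_eq_false, if_false]
                exact (ihn b S' hblen).2 hnin
              · simp only [ne_eq, heq, not_false_eq_true, if_true]
                rw [if_pos (fun hh => heq hh.symm)]
          · simp only [Bool.not_eq_true] at hsw
            simp only [hsw, Bool.not_false, if_true, Bool.false_eq_true, if_false]
            exact (ihn b _ hblen).2 hnin

-- ===== VERDICT (by name: the statement is the Claim_ definition above) =====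
theorem is_matched_html_spec : Claim_equal_is_matched_html := by
  intro raw _
  unfold Spec_is_matched_html
  simp only [is_matched_html, is_matched_html_alt]
  rw [show PySem.Chars.find raw.toList ['<'] = PySem.Chars.findFrom raw.toList ['<'] ((0 : Nat) : Int) by
    simp [PySem.Chars.findFrom_zero]]
  rw [aLoop_eq raw.toList (raw.toList.length + 1) 0 [] (by omega) (by omega), List.drop_zero]
  rw [splitOn_eq_splitAll]
  by_cases hd : '<' ∈ (splitAll raw.toList).getLastD []
  · rw [(bAux raw.toList.length raw.toList [] le_rfl).1 hd]
    rw [if_pos (by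
      rw [PySem.Chars.isIn_iff_infix, List.singleton_infix_iff]
      exact hd)]
  · rw [(bAux raw.toList.length raw.toList [] le_rfl).2 hd]
    rw [if_neg (by
      rw [PySem.Chars.isIn_iff_infix, List.singleton_infix_iff]
      exact hd)]
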